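-- pv_equiv track=rewrite | github.com/stiiven19/universidad | python/ds/grafos_app/class_grafo.py | conversor
-- ===== SOURCE A (Python) =====
-- def conversor(edges_alfabetic,lista_vertices):
--     edges_return=[]
--
--     i=0
--     for value in edges_alfabetic:
--         minilist=[]
--         salida=value[0]
--         llegada=value[1]
--         peso=value[2]
--
--         j=0
--         for v2 in lista_vertices:
--             if salida == v2:
--                 minilist.append(j)
--                 h=0
--                 for v3 in lista_vertices:
--                     if llegada == v3:
--                         minilist.append(h)
--                         minilist.append(peso)
--                         break
--                     h+=1
--             j+=1
--         i+=1
--         edges_return.append(minilist)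
--     return edges_return
-- ===== SOURCE B (Python) =====
-- def conversor(edges_alfabetic, lista_vertices):
--     # inverted index: label -> ordered list of all indices where it occurs
--     index = {}
--     j = 0
--     for v in lista_vertices:
--         index.setdefault(v, []).append(j)
--         j += 1
--
--     edges_return = []
--     for value in edges_alfabetic:
--         tgt = index.get(value[1], [])
--         extra = [tgt[0], value[2]] if tgt else []
--         minilist = []
--         for p in index.get(value[0], []):
--             minilist.append(p)
--             minilist.extend(extra)
--         edges_return.append(minilist)
--     return edges_return
-- ===== Notes on version B (the rewrite author's own statement) =====
-- stated objective: faster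
-- what changed: Replaces A's nested full scans of lista_vertices per edge (with a third scan per source match) by a label->indices inverted index built once, so each edge is two dict lookups plus output of its matches.
import Mathlib
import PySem

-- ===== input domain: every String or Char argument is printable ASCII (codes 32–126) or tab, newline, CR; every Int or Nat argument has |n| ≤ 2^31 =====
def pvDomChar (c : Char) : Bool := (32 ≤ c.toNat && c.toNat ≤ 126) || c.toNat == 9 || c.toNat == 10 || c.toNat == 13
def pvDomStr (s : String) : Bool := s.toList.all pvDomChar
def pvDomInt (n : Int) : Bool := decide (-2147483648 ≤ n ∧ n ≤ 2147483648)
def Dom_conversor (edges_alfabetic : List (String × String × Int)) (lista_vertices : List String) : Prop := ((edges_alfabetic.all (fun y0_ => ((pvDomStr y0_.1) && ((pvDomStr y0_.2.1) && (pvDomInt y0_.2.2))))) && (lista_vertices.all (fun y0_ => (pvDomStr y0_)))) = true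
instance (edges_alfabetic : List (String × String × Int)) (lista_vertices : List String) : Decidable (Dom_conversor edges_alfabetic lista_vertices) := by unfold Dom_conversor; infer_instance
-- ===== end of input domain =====

-- B replaces A's nested per-edge scans of lista_vertices by a label->indices inverted index built once (faster in a timing run's asymptotic mechanism).


-- ===== PORT A =====
-- innermost loop: scan lista_vertices for llegada with counter h, append [h, peso] and break
def pvFindLlegada (llegada : String) (peso : Int) : List String → Int → List Int
  | [], _ => []
  | v3 :: rest, h => if llegada == v3 then [h, peso] else pvFindLlegada llegada peso rest (h + 1)

-- middle loop: scan lista_vertices for salida with counter j, accumulating minilist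
def pvLoopJ (salida llegada : String) (peso : Int) (vs : List String) : List String → Int → List Int → List Int
  | [], _, minilist => minilist
  | v2 :: rest, j, minilist =>
      pvLoopJ salida llegada peso vs rest (j + 1)
        (if salida == v2 then minilist ++ [j] ++ pvFindLlegada llegada peso vs 0 else minilist)

def conversor (edges_alfabetic : List (String × String × Int)) (lista_vertices : List String) : List (List Int) :=
  edges_alfabetic.foldl
    (fun edges_return value =>
      let salida := value.1
      let llegada := value.2.1
      let peso := value.2.2
      let minilist := pvLoopJ salida llegada peso lista_vertices lista_vertices 0 []
      edges_return ++ [minilist]) []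

-- ===== PORT B =====
-- build the inverted index: label -> ordered list of all indices where it occurs
def pvBuildIndex : List String → Int → PySem.Dict String (List Int) → PySem.Dict String (List Int)
  | [], _, d => d
  | v :: rest, j, d => pvBuildIndex rest (j + 1) (d.modify v [] (· ++ [j]))

def pvMiniB (d : PySem.Dict String (List Int)) (value : String × String × Int) : List Int :=
  let tgt := d.getD value.2.1 []
  let extra := match tgt with
    | [] => []
    | t :: _ => [t, value.2.2]
  (d.getD value.1 []).foldl (fun minilist p => minilist ++ (p :: extra)) []

def conversor_alt (edges_alfabetic : List (String × String × Int)) (lista_vertices : List String) : List (List Int) :=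
  let index := pvBuildIndex lista_vertices 0 PySem.Dict.empty
  edges_alfabetic.map (pvMiniB index)

-- ===== PRECONDITION & SPEC =====
def Spec_conversor (edges_alfabetic : List (String × String × Int)) (lista_vertices : List String) (out : List (List Int)) : Prop := out = conversor_alt edges_alfabetic lista_vertices
instance (edges_alfabetic : List (String × String × Int)) (lista_vertices : List String) (out : List (List Int)) : Decidable (Spec_conversor edges_alfabetic lista_vertices out) := by unfold Spec_conversor; infer_instance

-- ===== CLAIM (what is proved, stated in full; the proofs are below) =====
def Claim_equal_conversor : Prop := ∀ (edges_alfabetic : List (String × String × Int)) (lista_vertices : List String), Dom_conversor edges_alfabetic lista_vertices → Spec_conversor edges_alfabetic lista_vertices (conversor edges_alfabetic lista_vertices)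

-- ===== LEMMAS AND PROOFS =====

-- the list of indices (starting at j) at which s occurs in vs: reference description of both sides
def pvOccIdx (s : String) : List String → Int → List Int
  | [], _ => []
  | v :: rest, j => (if s == v then [j] else []) ++ pvOccIdx s rest (j + 1)

lemma pvBuildIndex_getD (s : String) (vs : List String) (j : Int) (d : PySem.Dict String (List Int)) :
    (pvBuildIndex vs j d).getD s [] = d.getD s [] ++ pvOccIdx s vs j := by
  induction vs generalizing j d with
  | nil => simp [pvBuildIndex, pvOccIdx]
  | cons v rest ih =>
      simp only [pvBuildIndex, pvOccIdx, ih, PySem.Dict.getD_modify]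
      by_cases h : s = v <;> simp [h]

lemma pvFindLlegada_eq (l : String) (p : Int) (vs : List String) (h : Int) :
    pvFindLlegada l p vs h = match pvOccIdx l vs h with
      | [] => []
      | t :: _ => [t, p] := by
  induction vs generalizing h with
  | nil => simp [pvFindLlegada, pvOccIdx]
  | cons v rest ih =>
      by_cases hv : l == v <;> simp [pvFindLlegada, pvOccIdx, hv, ih]

lemma pvLoopJ_eq (s l : String) (p : Int) (vs rest : List String) (j : Int) (acc : List Int) :
    pvLoopJ s l p vs rest j acc =
      acc ++ (pvOccIdx s rest j).flatMap (fun q => q :: pvFindLlegada l p vs 0) := by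
  induction rest generalizing j acc with
  | nil => simp [pvLoopJ, pvOccIdx]
  | cons v r ih =>
      by_cases hv : s == v <;> simp [pvLoopJ, pvOccIdx, hv, ih]

lemma pvMiniB_eq (vs : List String) (value : String × String × Int) :
    pvMiniB (pvBuildIndex vs 0 PySem.Dict.empty) value =
      (pvOccIdx value.1 vs 0).flatMap
        (fun q => q :: pvFindLlegada value.2.1 value.2.2 vs 0) := by
  unfold pvMiniB
  rw [pvBuildIndex_getD, pvBuildIndex_getD, PySem.Dict.getD_empty, pvFindLlegada_eq]
  simp only [List.nil_append]
  have hfold : ∀ (xs : List Int) (extra acc : List Int),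
      xs.foldl (fun m p => m ++ (p :: extra)) acc = acc ++ xs.flatMap (fun q => q :: extra) := by
    intro xs
    induction xs with
    | nil => simp
    | cons x r ih => intro extra acc; simp [ih]
  cases htgt : pvOccIdx value.2.1 vs 0 <;> simp [hfold]

-- ===== VERDICT (by name: the statement is the Claim_ definition above) =====
theorem conversor_spec : Claim_equal_conversor := by
  intro edges vs _
  show conversor edges vs = conversor_alt edges vs
  unfold conversor conversor_alt
  rw [PySem.List.foldl_append_singleton_eq_map]
  apply List.map_congr_left
  intro value _
  rw [pvLoopJ_eq, pvMiniB_eq]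
  simp
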